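-- pv_equiv track=rewrite | github.com/VictorSuciu/movie_synthesis | src/parse_scripts.py | condense_an_script
-- ===== SOURCE A (Python) =====
-- def condense_an_script(an_script):
--     con_script = []
--     con_line = ''
--     pre_an = an_script[0][0]
--
--     for i, (an, line) in enumerate(an_script):
--
--         if an != pre_an:
--             con_script.append([pre_an, con_line])
--             con_line = ''
--
--         con_line += line + ' '
--
--         if i == len(an_script) - 1:
--             con_script.append([an, con_line])
--         pre_an = an
--
--     return con_script
-- ===== SOURCE B (Python) =====
-- def condense_an_script(an_script):
--     # Recursive run-splitting: peel off the leading run of equal annotations,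
--     # render it with one join, recurse on the remainder.
--     if not an_script:
--         return []
--     an = an_script[0][0]
--     i = 1
--     while i < len(an_script) and an_script[i][0] == an:
--         i += 1
--     text = ''.join(line + ' ' for _, line in an_script[:i])
--     return [[an, text]] + condense_an_script(an_script[i:])
-- ===== Notes on version B (the rewrite author's own statement) =====
-- stated objective: alternative
-- what changed: Replaces the single stateful pass (pending buffer, previous-annotation tracking, last-index flush) by a recursive run-splitting: peel the leading run of equal annotations, join its lines once, recurse on the rest.
import Mathlib
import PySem

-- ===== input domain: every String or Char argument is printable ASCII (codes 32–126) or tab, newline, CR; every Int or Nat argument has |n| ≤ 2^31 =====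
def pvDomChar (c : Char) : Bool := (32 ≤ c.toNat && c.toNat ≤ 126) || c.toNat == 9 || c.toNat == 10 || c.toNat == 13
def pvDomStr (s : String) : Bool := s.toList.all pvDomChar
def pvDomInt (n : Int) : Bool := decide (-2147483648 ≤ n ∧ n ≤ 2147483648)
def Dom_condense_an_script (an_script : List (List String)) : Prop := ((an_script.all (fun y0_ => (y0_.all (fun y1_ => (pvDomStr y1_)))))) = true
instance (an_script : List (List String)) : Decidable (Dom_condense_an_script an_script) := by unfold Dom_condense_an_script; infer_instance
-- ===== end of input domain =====

-- B restructures A's single stateful pass into recursive run-splitting (objective: alternative).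

-- ===== PORT A =====
-- 'an, line = pair' tuple-unpacking; Pre_ guarantees every pair has length 2 (otherwise Python raises)
def pvUnpack (l : List String) : String × String :=
  match l with
  | [a, b] => (a, b)
  | _ => ("", "")

-- loop body of A's 'for i, (an, line) in enumerate(an_script)', state = (con_script, con_line, pre_an)
def pvStepA (n : Int) (st : List (List String) × String × String) (p : Int × List String) :
    List (List String) × String × String :=
  let i := p.1
  let an := (pvUnpack p.2).1
  let line := (pvUnpack p.2).2
  let con_script := st.1
  let con_line := st.2.1
  let pre_an := st.2.2
  let con_script := if an ≠ pre_an then con_script ++ [[pre_an, con_line]] else con_script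
  let con_line := if an ≠ pre_an then "" else con_line
  let con_line := con_line ++ (line ++ " ")
  let con_script := if i = n - 1 then con_script ++ [[an, con_line]] else con_script
  (con_script, con_line, an)

def condense_an_script (an_script : List (List String)) : List (List String) :=
  -- an_script[0][0] raises IndexError on []; Pre_ excludes that input (headD totalizes it here)
  let pre_an := (an_script.headD []).headD ""
  ((PySem.List.enumerate an_script).foldl (pvStepA (an_script.length : Int)) ([], "", pre_an)).1

-- ===== PORT B =====
-- ''.join(line + ' ' for _, line in run)
def pvJoinRun (acc : String) (run : List (List String)) : String :=
  run.foldl (fun b p => b ++ ((pvUnpack p).2 ++ " ")) acc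

def condense_an_script_alt : List (List String) → List (List String)
  | [] => []
  | x :: xs =>
    let an := x.headD ""                                  -- an_script[0][0]
    let run := xs.takeWhile (fun y => y.headD "" == an)   -- while an_script[i][0] == an
    let rest := xs.dropWhile (fun y => y.headD "" == an)
    [an, pvJoinRun "" (x :: run)] :: condense_an_script_alt rest
  termination_by l => l.length
  decreasing_by
    simp only [List.length_cons]
    exact Nat.lt_succ_of_le (List.length_dropWhile_le _ _)

-- ===== PRECONDITION & SPEC =====
-- Pre_ excludes exactly the inputs on which A raises: the empty list (IndexError on
-- an_script[0][0]) and lists with an element whose length is not 2 (unpacking ValueError).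
def Pre_condense_an_script (an_script : List (List String)) : Prop :=
  an_script ≠ [] ∧ (an_script.all (fun l => l.length == 2)) = true

instance (an_script : List (List String)) : Decidable (Pre_condense_an_script an_script) := by
  unfold Pre_condense_an_script; infer_instance

def pvWitness_condense_an_script : List (List String) :=
  [["A", "hello"], ["A", "world"], ["B", "x"]]

def Spec_condense_an_script (an_script : List (List String)) (out : List (List String)) : Prop :=
  out = condense_an_script_alt an_script

instance (an_script : List (List String)) (out : List (List String)) : Decidable (Spec_condense_an_script an_script out) := by
  unfold Spec_condense_an_script; infer_instance

-- ===== CLAIM (what is proved, stated in full; the proofs are below) =====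
def Claim_equal_condense_an_script : Prop :=
  ∀ (an_script : List (List String)), Dom_condense_an_script an_script →
    Pre_condense_an_script an_script →
    Spec_condense_an_script an_script (condense_an_script an_script)

-- ===== LEMMAS AND PROOFS =====

-- A's loop, re-expressed on the remaining suffix: emits on annotation change and on the last element
def pvEmit : String → String → List (List String) → List (List String)
  | _, _, [] => []
  | pre, buf, x :: xs =>
    let an := (pvUnpack x).1
    let line := (pvUnpack x).2
    let emit := if an ≠ pre then [[pre, buf]] else []
    let buf' := (if an ≠ pre then "" else buf) ++ (line ++ " ")
    emit ++ (if xs.isEmpty then [[an, buf']] else []) ++ pvEmit an buf' xs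

lemma str_empty_append (s : String) : "" ++ s = s := rfl

lemma foldA_eq_pvEmit (xs : List (List String)) (n s : Int) (acc : List (List String))
    (buf pre : String) (h : s + xs.length = n) :
    ((PySem.List.enumerate xs s).foldl (pvStepA n) (acc, buf, pre)).1 = acc ++ pvEmit pre buf xs := by
  induction xs generalizing s acc buf pre with
  | nil => simp [pvEmit, PySem.List.enumerate_nil]
  | cons x xs ih =>
    rw [PySem.List.enumerate_cons, List.foldl_cons]
    have hlast : (s = n - 1) ↔ xs = [] := by
      constructor
      · intro hs
        cases xs with
        | nil => rfl
        | cons y ys => simp [List.length_cons] at h; omega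
      · intro hx; subst hx; simp at h; omega
    have h' : s + 1 + (xs.length : Int) = n := by simp [List.length_cons] at h; omega
    rw [ih _ _ _ _ h']
    simp only [pvStepA, pvEmit]
    by_cases han : (pvUnpack x).1 = pre
    · by_cases hx : xs = []
      · subst hx
        simp [han, hlast.mpr rfl, List.append_assoc]
      · have hs : ¬ (s = n - 1) := fun hs => hx (hlast.mp hs)
        simp [han, hs, List.isEmpty_iff, hx]
    · by_cases hx : xs = []
      · subst hx
        simp [han, hlast.mpr rfl, List.append_assoc]
      · have hs : ¬ (s = n - 1) := fun hs => hx (hlast.mp hs)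
        simp [han, hs, List.isEmpty_iff, hx, List.append_assoc]

-- on length-2 rows, the first entry read by B equals the first unpacked component
lemma key_eq_unpack (l : List String) (h : l.length = 2) : l.head?.getD "" = (pvUnpack l).1 := by
  match l, h with
  | [a, b], _ => rfl

lemma pvEmit_eq_alt (xs : List (List String)) (x : List String) (pre buf : String)
    (h2 : ∀ l ∈ x :: xs, l.head?.getD "" = (pvUnpack l).1) :
    pvEmit pre buf (x :: xs) =
      if (pvUnpack x).1 = pre then
        [pre, pvJoinRun buf (x :: xs.takeWhile (fun y => y.head?.getD "" == (pvUnpack x).1))] ::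
          condense_an_script_alt (xs.dropWhile (fun y => y.head?.getD "" == (pvUnpack x).1))
      else
        [pre, buf] :: condense_an_script_alt (x :: xs) := by
  induction xs generalizing x pre buf with
  | nil =>
    have hx : x.head?.getD "" = (pvUnpack x).1 := h2 x (by simp)
    by_cases han : (pvUnpack x).1 = pre <;>
      simp [pvEmit, pvJoinRun, condense_an_script_alt, han, hx]
  | cons y ys ih =>
    have hx : x.head?.getD "" = (pvUnpack x).1 := h2 x (by simp)
    have hy : y.head?.getD "" = (pvUnpack y).1 := h2 y (by simp)
    have h2' : ∀ l ∈ y :: ys, l.head?.getD "" = (pvUnpack l).1 := by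
      intro l hl; exact h2 l (by simp at hl ⊢; tauto)
    rw [show pvEmit pre buf (x :: y :: ys) =
      (if (pvUnpack x).1 ≠ pre then [[pre, buf]] else []) ++
        pvEmit (pvUnpack x).1 ((if (pvUnpack x).1 ≠ pre then "" else buf) ++ ((pvUnpack x).2 ++ " "))
          (y :: ys) from by simp [pvEmit]]
    rw [ih y _ _ h2']
    by_cases hky : (pvUnpack y).1 = (pvUnpack x).1
    · -- y continues x's run
      by_cases han : (pvUnpack x).1 = pre
      · subst han
        simp [hky, hy, condense_an_script_alt, pvJoinRun]
      · simp [han, hky, hy, hx, condense_an_script_alt, pvJoinRun, str_empty_append]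
    · -- x's run ends at y
      by_cases han : (pvUnpack x).1 = pre
      · subst han
        simp [hky, hy, condense_an_script_alt, pvJoinRun]
      · simp [han, hky, hy, hx, condense_an_script_alt, pvJoinRun]

-- ===== VERDICT (by name: the statement is the Claim_ definition above) =====
theorem condense_an_script_spec : Claim_equal_condense_an_script := by
  intro an_script _ hpre
  obtain ⟨hne, hall⟩ := hpre
  have h2 : ∀ l ∈ an_script, l.length = 2 := by
    intro l hl
    have := List.all_eq_true.mp hall l hl
    simpa using this
  unfold Spec_condense_an_script condense_an_script
  cases an_script with
  | nil => exact absurd rfl hne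
  | cons x xs =>
    have hk : ∀ l ∈ x :: xs, l.head?.getD "" = (pvUnpack l).1 :=
      fun l hl => key_eq_unpack l (h2 l hl)
    have hx : x.head?.getD "" = (pvUnpack x).1 := hk x (by simp)
    rw [foldA_eq_pvEmit (x :: xs) _ 0 [] "" _ (by simp)]
    rw [pvEmit_eq_alt xs x _ "" hk]
    simp [condense_an_script_alt, hx, pvJoinRun]
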